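-- pv_equiv track=rewrite | github.com/MnMaxon/AdventOfCoding | 2023/day_01/day_01.py | first_num_str
-- ===== SOURCE A (Python) =====
-- word_dic = {str(i): i for i in range(10)}
--
-- def first_num_str(s: str, d=word_dic):
--     first_pos = 9999999999
--     first_val = None
--     for find, cur_val in d.items():
--         if find in s:
--             cur_pos = s.find(find)
--             if cur_pos < first_pos:
--                 first_pos = cur_pos
--                 first_val = cur_val
--     if first_val is None:
--         raise ValueError(f'No numbers found in {s}')
--     return first_val
-- ===== SOURCE B (Python) =====
-- word_dic = {str(i): i for i in range(10)}
--
-- def first_num_str(s: str, d=word_dic):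
--     # single left-to-right positional sweep: the first position where any key
--     # starts, with dict order breaking ties, names the same winner as A's
--     # per-key find() minimisation with strict '<'.
--     for i in range(len(s) + 1):
--         for key, val in d.items():
--             if s.startswith(key, i):
--                 return val
--     raise ValueError(f'No numbers found in {s}')
-- ===== Notes on version B (the rewrite author's own statement) =====
-- stated objective: alternative
-- what changed: Replaces A's per-key s.find scans with running argmin by a single left-to-right positional sweep that returns the first key (in dict order) starting at the earliest position.
import Mathlib
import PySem

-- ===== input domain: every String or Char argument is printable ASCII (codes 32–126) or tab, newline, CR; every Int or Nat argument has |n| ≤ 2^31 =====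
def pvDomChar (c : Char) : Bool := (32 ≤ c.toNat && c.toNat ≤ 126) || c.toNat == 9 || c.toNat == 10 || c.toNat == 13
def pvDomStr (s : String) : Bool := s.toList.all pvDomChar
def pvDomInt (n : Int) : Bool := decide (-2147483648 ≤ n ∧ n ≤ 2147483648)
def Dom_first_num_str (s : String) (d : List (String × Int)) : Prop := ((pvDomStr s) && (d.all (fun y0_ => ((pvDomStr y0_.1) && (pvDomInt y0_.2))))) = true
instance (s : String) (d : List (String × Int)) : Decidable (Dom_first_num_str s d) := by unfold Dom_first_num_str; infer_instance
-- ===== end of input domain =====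

-- B replaces A's per-key find() argmin by a single left-to-right positional sweep (same results; alternative algorithm, no speed claim).


-- ===== PORT A =====
-- one loop iteration of A: running (first_pos, first_val) argmin over s.find(key), strict '<'
def fnsStep (s : String) (st : Int × Option Int) (p : String × Int) : Int × Option Int :=
  if PySem.Str.isIn p.1 s then
    (if PySem.Str.find s p.1 < st.1 then (PySem.Str.find s p.1, some p.2) else st)
  else st

def first_num_str (s : String) (d : List (String × Int)) : Int :=
  let r := ((PySem.Dict.ofList d).items).foldl (fnsStep s) (9999999999, none)
  match r.2 with
  | some v => v
  | none => 0   -- Python A raises ValueError here; excluded by Pre_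

-- ===== PORT B =====
-- B's sweep over positions i = 0 .. len(s): suffix cs.drop i stands for position i;
-- s.startswith(key, i) is exactly PySem.Chars.startswith (s.toList.drop i) key.toList for 0 ≤ i ≤ len(s)
def fnsSweep (items : List (String × Int)) : List Char → Option Int
  | [] =>
    match items.find? (fun p => PySem.Chars.startswith [] p.1.toList) with
    | some p => some p.2
    | none => none
  | c :: t =>
    match items.find? (fun p => PySem.Chars.startswith (c :: t) p.1.toList) with
    | some p => some p.2
    | none => fnsSweep items t

def first_num_str_alt (s : String) (d : List (String × Int)) : Int :=
  match fnsSweep (PySem.Dict.ofList d).items s.toList with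
  | some v => v
  | none => 0   -- Python B raises ValueError here; excluded by Pre_

-- ===== PRECONDITION & SPEC =====
-- Pre_ excludes exactly the inputs where Python A raises ValueError: no dict key occurs in s
-- (or, unrealisably, only at positions ≥ A's 9999999999 sentinel).
def Pre_first_num_str (s : String) (d : List (String × Int)) : Prop :=
  ∃ p ∈ d, PySem.Str.isIn p.1 s = true ∧ PySem.Str.find s p.1 < 9999999999
instance (s : String) (d : List (String × Int)) : Decidable (Pre_first_num_str s d) := by unfold Pre_first_num_str; infer_instance
def pvWitness_first_num_str : String × (List (String × Int)) := ("a1b", [("1", 1), ("b", 7)])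

def Spec_first_num_str (s : String) (d : List (String × Int)) (out : Int) : Prop := out = first_num_str_alt s d
instance (s : String) (d : List (String × Int)) (out : Int) : Decidable (Spec_first_num_str s d out) := by unfold Spec_first_num_str; infer_instance

-- ===== CLAIM (what is proved, stated in full; the proofs are below) =====
def Claim_equal_first_num_str : Prop := ∀ (s : String) (d : List (String × Int)), Dom_first_num_str s d → Pre_first_num_str s d → Spec_first_num_str s d (first_num_str s d)

-- ===== LEMMAS AND PROOFS =====

theorem fns_find?_congr {α : Type} (p q : α → Bool) (l : List α)
    (h : ∀ x ∈ l, p x = q x) : l.find? p = l.find? q := by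
  induction l with
  | nil => rfl
  | cons x t ih =>
    have hx := h x (by simp)
    simp only [List.find?_cons, ← hx]
    cases hpx : p x
    · exact ih (fun y hy => h y (by simp [hy]))
    · rfl

-- the three running-minimum invariants of A's fold, in one induction
theorem fns_fold_fst (s : String) (l : List (String × Int)) (a : Int) (v : Option Int) :
    (l.foldl (fnsStep s) (a, v)).1 ≤ a ∧
    (∀ p ∈ l, PySem.Str.isIn p.1 s = true → (l.foldl (fnsStep s) (a, v)).1 ≤ PySem.Str.find s p.1) ∧
    ((l.foldl (fnsStep s) (a, v)).1 < a →
      ∃ p ∈ l, PySem.Str.isIn p.1 s = true ∧ PySem.Str.find s p.1 = (l.foldl (fnsStep s) (a, v)).1) := by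
  induction l generalizing a v with
  | nil => simp
  | cons x t ih =>
    by_cases h1 : PySem.Str.isIn x.1 s = true
    · by_cases h2 : PySem.Str.find s x.1 < a
      · have hstep : fnsStep s (a, v) x = (PySem.Str.find s x.1, some x.2) := by
          unfold fnsStep; rw [if_pos h1, if_pos h2]
        obtain ⟨ihle, ihmin, ihach⟩ := ih (PySem.Str.find s x.1) (some x.2)
        simp only [List.foldl_cons, hstep]
        refine ⟨le_trans ihle (le_of_lt h2), ?_, ?_⟩
        · intro p hp hpin
          rcases List.mem_cons.mp hp with hp | hp
          · subst hp; exact ihle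
          · exact ihmin p hp hpin
        · intro hlt
          by_cases h3 : (t.foldl (fnsStep s) (PySem.Str.find s x.1, some x.2)).1 < PySem.Str.find s x.1
          · obtain ⟨p, hp, hpin, hpf⟩ := ihach h3
            exact ⟨p, List.mem_cons.mpr (Or.inr hp), hpin, hpf⟩
          · exact ⟨x, List.mem_cons.mpr (Or.inl rfl), h1, le_antisymm (not_lt.mp h3) ihle⟩
      · have hstep : fnsStep s (a, v) x = (a, v) := by
          unfold fnsStep; rw [if_pos h1, if_neg h2]
        obtain ⟨ihle, ihmin, ihach⟩ := ih a v
        simp only [List.foldl_cons, hstep]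
        refine ⟨ihle, ?_, ?_⟩
        · intro p hp hpin
          rcases List.mem_cons.mp hp with hp | hp
          · subst hp; exact le_trans ihle (not_lt.mp h2)
          · exact ihmin p hp hpin
        · intro hlt
          obtain ⟨p, hp, hpin, hpf⟩ := ihach hlt
          exact ⟨p, List.mem_cons.mpr (Or.inr hp), hpin, hpf⟩
    · have hstep : fnsStep s (a, v) x = (a, v) := by
        unfold fnsStep; rw [if_neg h1]
      obtain ⟨ihle, ihmin, ihach⟩ := ih a v
      simp only [List.foldl_cons, hstep]
      refine ⟨ihle, ?_, ?_⟩
      · intro p hp hpin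
        rcases List.mem_cons.mp hp with hp | hp
        · subst hp; exact absurd hpin h1
        · exact ihmin p hp hpin
      · intro hlt
        obtain ⟨p, hp, hpin, hpf⟩ := ihach hlt
        exact ⟨p, List.mem_cons.mpr (Or.inr hp), hpin, hpf⟩

-- A's final value is the value of the FIRST item whose find-position equals the final minimum
theorem fns_fold_snd (s : String) (l : List (String × Int)) (a : Int) (v : Option Int) :
    ((l.foldl (fnsStep s) (a, v)).1 < a →
      (l.foldl (fnsStep s) (a, v)).2 =
        (l.find? (fun p => PySem.Str.isIn p.1 s &&
          (PySem.Str.find s p.1 == (l.foldl (fnsStep s) (a, v)).1))).map Prod.snd) ∧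
    (¬ (l.foldl (fnsStep s) (a, v)).1 < a → (l.foldl (fnsStep s) (a, v)).2 = v) := by
  induction l generalizing a v with
  | nil => simp
  | cons x t ih =>
    by_cases h1 : PySem.Str.isIn x.1 s = true
    · by_cases h2 : PySem.Str.find s x.1 < a
      · have hstep : fnsStep s (a, v) x = (PySem.Str.find s x.1, some x.2) := by
          unfold fnsStep; rw [if_pos h1, if_pos h2]
        obtain ⟨ihlt, ihge⟩ := ih (PySem.Str.find s x.1) (some x.2)
        have hle := (fns_fold_fst s t (PySem.Str.find s x.1) (some x.2)).1
        simp only [List.foldl_cons, hstep]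
        constructor
        · intro _
          by_cases h3 : (t.foldl (fnsStep s) (PySem.Str.find s x.1, some x.2)).1 < PySem.Str.find s x.1
          · have hne : (PySem.Str.isIn x.1 s &&
                (PySem.Str.find s x.1 ==
                  (t.foldl (fnsStep s) (PySem.Str.find s x.1, some x.2)).1)) = false := by
              rw [Bool.eq_false_iff]
              intro hT
              rw [Bool.and_eq_true] at hT
              obtain ⟨-, hbeq⟩ := hT
              have := beq_iff_eq.mp hbeq
              omega
            rw [ihlt h3]
            simp only [List.find?_cons, hne]
          · have heq : (t.foldl (fnsStep s) (PySem.Str.find s x.1, some x.2)).1 =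
                PySem.Str.find s x.1 := le_antisymm hle (not_lt.mp h3)
            have hpos : (PySem.Str.isIn x.1 s &&
                (PySem.Str.find s x.1 ==
                  (t.foldl (fnsStep s) (PySem.Str.find s x.1, some x.2)).1)) = true := by
              simp only [Bool.and_eq_true, beq_iff_eq]
              exact ⟨h1, heq.symm⟩
            rw [ihge h3]
            simp only [List.find?_cons, hpos, Option.map_some]
        · intro h3
          exact absurd (lt_of_le_of_lt hle h2) h3
      · have hstep : fnsStep s (a, v) x = (a, v) := by
          unfold fnsStep; rw [if_pos h1, if_neg h2]
        obtain ⟨ihlt, ihge⟩ := ih a v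
        simp only [List.foldl_cons, hstep]
        refine ⟨?_, ihge⟩
        intro h3
        have hne : (PySem.Str.isIn x.1 s &&
            (PySem.Str.find s x.1 == (t.foldl (fnsStep s) (a, v)).1)) = false := by
          rw [Bool.eq_false_iff]
          intro hT
          rw [Bool.and_eq_true] at hT
          obtain ⟨-, hbeq⟩ := hT
          have := beq_iff_eq.mp hbeq
          omega
        rw [ihlt h3]
        simp only [List.find?_cons, hne]
    · have hstep : fnsStep s (a, v) x = (a, v) := by
        unfold fnsStep; rw [if_neg h1]
      obtain ⟨ihlt, ihge⟩ := ih a v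
      simp only [List.foldl_cons, hstep]
      refine ⟨?_, ihge⟩
      intro h3
      have hne : (PySem.Str.isIn x.1 s &&
          (PySem.Str.find s x.1 == (t.foldl (fnsStep s) (a, v)).1)) = false := by
        rw [Bool.eq_false_iff]
        intro hT
        rw [Bool.and_eq_true] at hT
        exact absurd hT.1 h1
      rw [ihlt h3]
      simp only [List.find?_cons, hne]

-- below the running minimum no key can start: its first occurrence would be earlier
theorem fns_no_match (s : String) (l : List (String × Int)) (M : Int) (i : ℕ)
    (hmin : ∀ p ∈ l, PySem.Str.isIn p.1 s = true → M ≤ PySem.Str.find s p.1)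
    (hi : (i : Int) < M) :
    ∀ p ∈ l, PySem.Chars.startswith (s.toList.drop i) p.1.toList = false := by
  intro p hp
  by_contra hc
  have hpre : p.1.toList <+: s.toList.drop i :=
    (PySem.Chars.startswith_iff _ _).mp ((Bool.not_eq_false _).mp hc)
  have hin : PySem.Chars.isIn p.1.toList s.toList = true :=
    (PySem.Chars.exists_prefix_drop_iff_isIn _ _).mp ⟨i, hpre⟩
  have h0 : 0 ≤ PySem.Chars.find s.toList p.1.toList :=
    (PySem.Chars.find_nonneg_iff _ _).mpr ((PySem.Chars.isIn_iff_infix _ _).mp hin)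
  have hspec := PySem.Chars.find_spec h0
  have hle : (PySem.Chars.find s.toList p.1.toList).toNat ≤ i := by
    by_contra hgt
    exact hspec.2 i (by omega) hpre
  have hM := hmin p hp (by rw [PySem.Str.isIn_eq]; exact hin)
  rw [PySem.Str.find_eq] at hM
  omega

theorem fns_sweep_some (l : List (String × Int)) (suf : List Char) (q : String × Int)
    (h : l.find? (fun p => PySem.Chars.startswith suf p.1.toList) = some q) :
    fnsSweep l suf = some q.2 := by
  cases suf <;> simp [fnsSweep, h]

theorem fns_sweep_skip (l : List (String × Int)) (cs : List Char) (k : ℕ) :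
    ∀ i : ℕ, (∀ j, i ≤ j → j < i + k → ∀ p ∈ l, PySem.Chars.startswith (cs.drop j) p.1.toList = false) →
    i + k ≤ cs.length → fnsSweep l (cs.drop i) = fnsSweep l (cs.drop (i + k)) := by
  induction k with
  | zero => intro i _ _; rfl
  | succ k ih =>
    intro i h hlen
    have hi : i < cs.length := by omega
    have hnone : l.find? (fun p => PySem.Chars.startswith (cs.drop i) p.1.toList) = none :=
      List.find?_eq_none.mpr (fun p hp => by simp [h i le_rfl (by omega) p hp])
    have hstep : fnsSweep l (cs.drop i) = fnsSweep l (cs.drop (i + 1)) := by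
      rw [List.drop_eq_getElem_cons hi] at hnone ⊢
      rw [fnsSweep, hnone]
    have htail := ih (i + 1) (fun j hj1 hj2 p hp => h j (by omega) (by omega) p hp) (by omega)
    have harith : i + 1 + k = i + (k + 1) := by omega
    rw [harith] at htail
    rw [hstep, htail]

theorem fns_mem_keys_foldl {ν : Type} (l : List (String × ν)) (d0 : PySem.Dict String ν) (k : String) :
    k ∈ (l.foldl (fun acc p => acc.insert p.1 p.2) d0).keys ↔ k ∈ d0.keys ∨ ∃ p ∈ l, p.1 = k := by
  induction l generalizing d0 with
  | nil => simp
  | cons x t ih =>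
    simp only [List.foldl_cons, ih, PySem.Dict.mem_keys_insert, List.mem_cons]
    constructor
    · rintro (⟨rfl | hk⟩ | ⟨p, hp, hpk⟩)
      · exact Or.inr ⟨x, Or.inl rfl, rfl⟩
      · exact Or.inl hk
      · exact Or.inr ⟨p, Or.inr hp, hpk⟩
    · rintro (hk | ⟨p, hp | hp, hpk⟩)
      · exact Or.inl (Or.inr hk)
      · exact Or.inl (Or.inl (by rw [hp] at hpk; exact hpk.symm))
      · exact Or.inr ⟨p, hp, hpk⟩

-- a key-only condition holds on some item of dict(d) iff it holds on some pair of d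
theorem fns_exists_items (d : List (String × Int)) (C : String → Prop) :
    (∃ p ∈ (PySem.Dict.ofList d).items, C p.1) ↔ ∃ p ∈ d, C p.1 := by
  have hkeys : ∀ k, k ∈ (PySem.Dict.ofList d).keys ↔ ∃ p ∈ d, p.1 = k := by
    intro k
    simp only [PySem.Dict.ofList, PySem.Dict.update]
    rw [fns_mem_keys_foldl]
    simp [PySem.Dict.keys_empty]
  constructor
  · rintro ⟨p, hp, hC⟩
    have hk : p.1 ∈ (PySem.Dict.ofList d).keys := by
      simp only [PySem.Dict.keys, List.mem_map]
      exact ⟨p, hp, rfl⟩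
    obtain ⟨q, hq, hqk⟩ := (hkeys p.1).mp hk
    exact ⟨q, hq, by rw [hqk]; exact hC⟩
  · rintro ⟨p, hp, hC⟩
    have hk : p.1 ∈ (PySem.Dict.ofList d).keys := (hkeys p.1).mpr ⟨p, hp, rfl⟩
    simp only [PySem.Dict.keys, List.mem_map] at hk
    obtain ⟨q, hq, hqk⟩ := hk
    exact ⟨q, hq, by rw [hqk]; exact hC⟩

-- ===== VERDICT (by name: the statement is the Claim_ definition above) =====
theorem first_num_str_spec : Claim_equal_first_num_str := by
  intro s d _ hpre
  unfold Spec_first_num_str first_num_str first_num_str_alt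
  have hpre' := (fns_exists_items d
    (fun k => PySem.Str.isIn k s = true ∧ PySem.Str.find s k < 9999999999)).mpr hpre
  generalize hlgen : (PySem.Dict.ofList d).items = l
  rw [hlgen] at hpre'
  obtain ⟨hle, hmin, hach⟩ := fns_fold_fst s l 9999999999 none
  obtain ⟨q, hq, hqin, hqlt⟩ := hpre'
  have hrlt : (l.foldl (fnsStep s) ((9999999999 : Int), (none : Option Int))).1 < 9999999999 :=
    lt_of_le_of_lt (hmin q hq hqin) hqlt
  obtain ⟨p₀, hp₀, hpin, hpf⟩ := hach hrlt
  -- abbreviation M for the final minimum position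
  set M : Int := (l.foldl (fnsStep s) ((9999999999 : Int), (none : Option Int))).1 with hM
  have h0 : (0 : Int) ≤ M := by
    rw [← hpf, PySem.Str.find_eq]
    exact (PySem.Chars.find_nonneg_iff _ _).mpr
      ((PySem.Chars.isIn_iff_infix _ _).mp (by rw [← PySem.Str.isIn_eq]; exact hpin))
  have hlenM : M ≤ (s.toList.length : Int) := by
    rw [← hpf, PySem.Str.find_eq]
    exact PySem.Chars.find_le_length _ _
  have hMn : ((M.toNat : ℕ) : Int) = M := Int.toNat_of_nonneg h0
  have hminC : ∀ p ∈ l, PySem.Chars.isIn p.1.toList s.toList = true →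
      M ≤ PySem.Chars.find s.toList p.1.toList := by
    intro p hp hin
    have := hmin p hp (by rw [PySem.Str.isIn_eq]; exact hin)
    rwa [PySem.Str.find_eq] at this
  -- B's sweep skips every position before the minimum
  have hsw : fnsSweep l s.toList = fnsSweep l (s.toList.drop M.toNat) := by
    have := fns_sweep_skip l s.toList M.toNat 0
      (fun j _ hj => fns_no_match s l M j hmin (by omega)) (by omega)
    simpa using this
  -- at the minimum position, the keys that start there are exactly those whose find equals it
  have hcong : l.find? (fun p => PySem.Chars.startswith (s.toList.drop M.toNat) p.1.toList) =
      l.find? (fun p => PySem.Str.isIn p.1 s && (PySem.Str.find s p.1 == M)) := by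
    apply fns_find?_congr
    intro p hp
    rw [Bool.eq_iff_iff]
    simp only [Bool.and_eq_true, beq_iff_eq, PySem.Chars.startswith_iff,
      PySem.Str.isIn_eq, PySem.Str.find_eq]
    constructor
    · intro hpre2
      have hin : PySem.Chars.isIn p.1.toList s.toList = true :=
        (PySem.Chars.exists_prefix_drop_iff_isIn _ _).mp ⟨M.toNat, hpre2⟩
      have h0' : 0 ≤ PySem.Chars.find s.toList p.1.toList :=
        (PySem.Chars.find_nonneg_iff _ _).mpr ((PySem.Chars.isIn_iff_infix _ _).mp hin)
      have hub : (PySem.Chars.find s.toList p.1.toList).toNat ≤ M.toNat := by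
        by_contra hgt
        exact (PySem.Chars.find_spec h0').2 M.toNat (by omega) hpre2
      have hlb := hminC p hp hin
      exact ⟨hin, by omega⟩
    · rintro ⟨hin, hf⟩
      have h0' : 0 ≤ PySem.Chars.find s.toList p.1.toList := by rw [hf]; exact h0
      have ht : (PySem.Chars.find s.toList p.1.toList).toNat = M.toNat := by omega
      have := (PySem.Chars.find_spec h0').1
      rwa [ht] at this
  -- the first matching item exists
  have hsome : (l.find? (fun p => PySem.Str.isIn p.1 s && (PySem.Str.find s p.1 == M))).isSome := by
    apply List.find?_isSome.mpr
    refine ⟨p₀, hp₀, ?_⟩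
    simp only [hpin, Bool.true_and, beq_iff_eq]
    exact hpf
  obtain ⟨q', hq'⟩ := Option.isSome_iff_exists.mp hsome
  have hsnd : (l.foldl (fnsStep s) ((9999999999 : Int), (none : Option Int))).2 = some q'.2 := by
    rw [(fns_fold_snd s l 9999999999 none).1 hrlt, ← hM, hq']
    rfl
  have halt : fnsSweep l s.toList = some q'.2 := by
    rw [hsw]
    exact fns_sweep_some l _ q' (by rw [hcong]; exact hq')
  simp only [hsnd, halt]
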